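-- pv_equiv track=rewrite | github.com/Ginx172/Nursing-Training-AI | Nursing_Interviews_AI_model/rag_engine/extract_document_summaries.py | guess_modules
-- ===== SOURCE A (Python) =====
-- def guess_modules(text):
--     text_lower = text.lower()
--     modules = []
--     if any(x in text_lower for x in ["interview", "band 5", "nhs", "star"]):
--         modules.append("Interviuri NHS")
--     if any(x in text_lower for x in ["infection", "skin", "clinical training"]):
--         modules.append("Training Clinic")
--     if any(x in text_lower for x in ["leadership", "management", "delegation"]):
--         modules.append("Leadership")
--     if "governance" in text_lower or "quality improvement" in text_lower:
--         modules.append("Clinical Governance")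
--     if "mental health" in text_lower or "depression" in text_lower:
--         modules.append("Mental Health")
--     if "complaint" in text_lower or "communication" in text_lower:
--         modules.append("Communication")
--     if "pediatric" in text_lower or "neonatal" in text_lower:
--         modules.append("Pediatrics")
--     if "gynae" in text_lower or "obstetric" in text_lower:
--         modules.append("Gynaecology")
--     return modules
-- ===== SOURCE B (Python) =====
-- # B: single left-to-right scan of the lowered text; at each position record which
-- # module each keyword starting there belongs to, then emit tags in canonical order.
-- KEYWORD_TAGS = [
--     ("interview", "Interviuri NHS"), ("band 5", "Interviuri NHS"),
--     ("nhs", "Interviuri NHS"), ("star", "Interviuri NHS"),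
--     ("infection", "Training Clinic"), ("skin", "Training Clinic"),
--     ("clinical training", "Training Clinic"),
--     ("leadership", "Leadership"), ("management", "Leadership"),
--     ("delegation", "Leadership"),
--     ("governance", "Clinical Governance"), ("quality improvement", "Clinical Governance"),
--     ("mental health", "Mental Health"), ("depression", "Mental Health"),
--     ("complaint", "Communication"), ("communication", "Communication"),
--     ("pediatric", "Pediatrics"), ("neonatal", "Pediatrics"),
--     ("gynae", "Gynaecology"), ("obstetric", "Gynaecology"),
-- ]
-- TAG_ORDER = ["Interviuri NHS", "Training Clinic", "Leadership", "Clinical Governance",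
--              "Mental Health", "Communication", "Pediatrics", "Gynaecology"]
--
-- def guess_modules(text):
--     t = text.lower()
--     hits = set()
--     for j in range(len(t)):
--         for kw, tag in KEYWORD_TAGS:
--             if t.startswith(kw, j):
--                 hits.add(tag)
--     return [tag for tag in TAG_ORDER if tag in hits]
-- ===== Notes on version B (the rewrite author's own statement) =====
-- stated objective: alternative
-- what changed: Replaces A's eight per-module any-substring membership tests by a single left-to-right scan of the lowered text that collects, into a set, the tag of every keyword starting at each position, then emits the tags in canonical order.
import Mathlib
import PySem

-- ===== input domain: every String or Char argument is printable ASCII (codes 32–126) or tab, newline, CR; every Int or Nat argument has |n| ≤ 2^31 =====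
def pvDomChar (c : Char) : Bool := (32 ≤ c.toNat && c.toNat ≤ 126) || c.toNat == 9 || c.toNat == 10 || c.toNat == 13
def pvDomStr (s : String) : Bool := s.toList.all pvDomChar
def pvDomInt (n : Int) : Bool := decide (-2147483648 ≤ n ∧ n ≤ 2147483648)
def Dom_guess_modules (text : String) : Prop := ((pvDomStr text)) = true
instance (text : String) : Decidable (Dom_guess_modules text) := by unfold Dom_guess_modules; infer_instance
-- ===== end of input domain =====

-- B replaces A's eight per-module any-substring tests by one left-to-right scan of the
-- lowered text collecting keyword tags into a set, emitted in canonical order (same values).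

-- ===== PORT A =====
def guess_modules (text : String) : List String :=
  let text_lower := PySem.Str.lower text
  let modules : List String := []
  let modules := if ["interview", "band 5", "nhs", "star"].any (fun x => PySem.Str.isIn x text_lower)
    then modules ++ ["Interviuri NHS"] else modules
  let modules := if ["infection", "skin", "clinical training"].any (fun x => PySem.Str.isIn x text_lower)
    then modules ++ ["Training Clinic"] else modules
  let modules := if ["leadership", "management", "delegation"].any (fun x => PySem.Str.isIn x text_lower)
    then modules ++ ["Leadership"] else modules
  let modules := if PySem.Str.isIn "governance" text_lower || PySem.Str.isIn "quality improvement" text_lower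
    then modules ++ ["Clinical Governance"] else modules
  let modules := if PySem.Str.isIn "mental health" text_lower || PySem.Str.isIn "depression" text_lower
    then modules ++ ["Mental Health"] else modules
  let modules := if PySem.Str.isIn "complaint" text_lower || PySem.Str.isIn "communication" text_lower
    then modules ++ ["Communication"] else modules
  let modules := if PySem.Str.isIn "pediatric" text_lower || PySem.Str.isIn "neonatal" text_lower
    then modules ++ ["Pediatrics"] else modules
  let modules := if PySem.Str.isIn "gynae" text_lower || PySem.Str.isIn "obstetric" text_lower
    then modules ++ ["Gynaecology"] else modules
  modules

-- ===== PORT B =====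
def pvKeywordTags : List (String × String) :=
  [("interview", "Interviuri NHS"), ("band 5", "Interviuri NHS"),
   ("nhs", "Interviuri NHS"), ("star", "Interviuri NHS"),
   ("infection", "Training Clinic"), ("skin", "Training Clinic"),
   ("clinical training", "Training Clinic"),
   ("leadership", "Leadership"), ("management", "Leadership"),
   ("delegation", "Leadership"),
   ("governance", "Clinical Governance"), ("quality improvement", "Clinical Governance"),
   ("mental health", "Mental Health"), ("depression", "Mental Health"),
   ("complaint", "Communication"), ("communication", "Communication"),
   ("pediatric", "Pediatrics"), ("neonatal", "Pediatrics"),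
   ("gynae", "Gynaecology"), ("obstetric", "Gynaecology")]

def pvTagOrder : List String :=
  ["Interviuri NHS", "Training Clinic", "Leadership", "Clinical Governance",
   "Mental Health", "Communication", "Pediatrics", "Gynaecology"]

def guess_modules_alt (text : String) : List String :=
  let t := PySem.Str.lower text
  let hits : PySem.Set String :=
    (PySem.List.pyRange 0 (PySem.Str.len t) 1).foldl
      (fun hits j =>
        pvKeywordTags.foldl
          (fun hits p =>
            if PySem.Str.startswith (PySem.Str.slice t (some j) none) p.1
            then PySem.Set.add hits p.2 else hits)
          hits)
      PySem.Set.empty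
  pvTagOrder.filter (fun tag => PySem.Set.contains hits tag)

-- ===== PRECONDITION & SPEC =====
def Spec_guess_modules (text : String) (out : List String) : Prop := out = guess_modules_alt text
instance (text : String) (out : List String) : Decidable (Spec_guess_modules text out) := by unfold Spec_guess_modules; infer_instance

-- ===== CLAIM =====
def Claim_equal_guess_modules : Prop := ∀ (text : String), Dom_guess_modules text → Spec_guess_modules text (guess_modules text)

-- ===== LEMMAS AND PROOFS =====


-- membership in the inner fold over the keyword table
theorem pvInnerMem (P : String → Bool) (kts : List (String × String)) (s : PySem.Set String) (tag : String) :
    tag ∈ kts.foldl (fun s p => if P p.1 then PySem.Set.add s p.2 else s) s ↔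
      tag ∈ s ∨ ∃ p ∈ kts, P p.1 = true ∧ p.2 = tag := by
  induction kts generalizing s with
  | nil => simp
  | cons h rest ih =>
    simp only [List.foldl_cons, ih, List.mem_cons]
    by_cases hp : P h.1 = true
    · simp only [if_pos hp, PySem.Set.mem_add]
      aesop
    · simp only [if_neg hp]
      aesop

-- membership in the position-scan fold
theorem pvOuterMem (t : String) (L : List Int) (s : PySem.Set String) (tag : String) :
    tag ∈ L.foldl (fun hits j => pvKeywordTags.foldl
        (fun hits p => if PySem.Str.startswith (PySem.Str.slice t (some j) none) p.1
          then PySem.Set.add hits p.2 else hits) hits) s ↔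
      tag ∈ s ∨ ∃ j ∈ L, ∃ p ∈ pvKeywordTags,
        PySem.Str.startswith (PySem.Str.slice t (some j) none) p.1 = true ∧ p.2 = tag := by
  induction L generalizing s with
  | nil => simp
  | cons a rest ih =>
    simp only [List.foldl_cons, ih,
      pvInnerMem (fun kw => PySem.Str.startswith (PySem.Str.slice t (some a) none) kw),
      List.mem_cons]
    aesop

-- a nonempty keyword starts at some scanned position iff it is a substring
theorem pvScanHit (t kw : String) (h : kw.toList ≠ []) :
    (∃ j : Int, (0 ≤ j ∧ j < (t.toList.length : Int)) ∧
        PySem.Str.startswith (PySem.Str.slice t (some j) none) kw = true) ↔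
      PySem.Str.isIn kw t = true := by
  have hsw : ∀ j : Int, 0 ≤ j →
      (PySem.Str.startswith (PySem.Str.slice t (some j) none) kw = true ↔
        kw.toList <+: t.toList.drop j.toNat) := by
    intro j hj
    rw [PySem.Str.startswith_eq, PySem.Str.toList_slice, PySem.Chars.slice_eq_listSlice,
      PySem.List.slice_from t.toList hj, PySem.Chars.startswith_iff]
  rw [PySem.Str.isIn_eq, ← PySem.Chars.exists_prefix_drop_iff_isIn]
  constructor
  · rintro ⟨j, ⟨h0, _⟩, hstart⟩
    exact ⟨j.toNat, (hsw j h0).mp hstart⟩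
  · rintro ⟨n, hpre⟩
    by_cases hn : n < t.toList.length
    · refine ⟨(n : Int), ⟨by positivity, by exact_mod_cast hn⟩, ?_⟩
      rw [hsw (n : Int) (by positivity)]
      simpa using hpre
    · exfalso
      have : t.toList.drop n = [] := List.drop_eq_nil_of_le (by omega)
      rw [this] at hpre
      exact h (List.prefix_nil.mp hpre)

-- every keyword in the table is nonempty
theorem pvKwNonempty : ∀ p ∈ pvKeywordTags, p.1.toList ≠ [] := by decide

-- the scan's hit set the port builds, characterized by substring presence
theorem pvContainsHits (t : String) (tag : String) :
    PySem.Set.contains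
      ((PySem.List.pyRange 0 (PySem.Str.len t) 1).foldl
        (fun hits j => pvKeywordTags.foldl
          (fun hits p => if PySem.Str.startswith (PySem.Str.slice t (some j) none) p.1
            then PySem.Set.add hits p.2 else hits) hits)
        PySem.Set.empty) tag
    = pvKeywordTags.any (fun p => PySem.Str.isIn p.1 t && (p.2 == tag)) := by
  rw [Bool.eq_iff_iff]
  rw [show (PySem.Set.contains = fun (s : PySem.Set String) x => List.contains s x) from rfl]
  rw [List.contains_iff_mem, pvOuterMem, List.any_eq_true]
  simp only [PySem.Set.empty, List.not_mem_nil, false_or, Bool.and_eq_true, beq_iff_eq,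
    PySem.List.mem_pyRange_one, PySem.Str.len_eq]
  constructor
  · rintro ⟨j, hj, p, hp, hP, ht⟩
    exact ⟨p, hp, (pvScanHit t p.1 (pvKwNonempty p hp)).mp ⟨j, hj, hP⟩, ht⟩
  · rintro ⟨p, hp, hin, ht⟩
    obtain ⟨j, hj, hP⟩ := (pvScanHit t p.1 (pvKwNonempty p hp)).mpr hin
    exact ⟨j, hj, p, hp, hP, ht⟩

-- ===== VERDICT =====
theorem guess_modules_spec : Claim_equal_guess_modules := by
  intro text _
  unfold Spec_guess_modules guess_modules guess_modules_alt
  rw [List.filter_congr (fun tag _ => pvContainsHits (PySem.Str.lower text) tag)]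
  simp only [pvTagOrder, pvKeywordTags, List.filter_cons, List.filter_nil, List.any_cons,
    List.any_nil, String.reduceBEq, beq_self_eq_true, Bool.or_false, Bool.and_true,
    Bool.and_false, Bool.false_or]
  generalize (PySem.Str.isIn "interview" (PySem.Str.lower text) || (PySem.Str.isIn "band 5" (PySem.Str.lower text) || (PySem.Str.isIn "nhs" (PySem.Str.lower text) || PySem.Str.isIn "star" (PySem.Str.lower text)))) = b1
  generalize (PySem.Str.isIn "infection" (PySem.Str.lower text) || (PySem.Str.isIn "skin" (PySem.Str.lower text) || PySem.Str.isIn "clinical training" (PySem.Str.lower text))) = b2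
  generalize (PySem.Str.isIn "leadership" (PySem.Str.lower text) || (PySem.Str.isIn "management" (PySem.Str.lower text) || PySem.Str.isIn "delegation" (PySem.Str.lower text))) = b3
  generalize (PySem.Str.isIn "governance" (PySem.Str.lower text) || PySem.Str.isIn "quality improvement" (PySem.Str.lower text)) = b4
  generalize (PySem.Str.isIn "mental health" (PySem.Str.lower text) || PySem.Str.isIn "depression" (PySem.Str.lower text)) = b5
  generalize (PySem.Str.isIn "complaint" (PySem.Str.lower text) || PySem.Str.isIn "communication" (PySem.Str.lower text)) = b6
  generalize (PySem.Str.isIn "pediatric" (PySem.Str.lower text) || PySem.Str.isIn "neonatal" (PySem.Str.lower text)) = b7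
  generalize (PySem.Str.isIn "gynae" (PySem.Str.lower text) || PySem.Str.isIn "obstetric" (PySem.Str.lower text)) = b8
  cases b1 <;> cases b2 <;> cases b3 <;> cases b4 <;> cases b5 <;> cases b6 <;> cases b7 <;> cases b8 <;> rfl
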